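-- pv_equiv track=rewrite | github.com/tudorsonycx/cs61a | discs/disc03/disc03.py | has_seven
-- ===== SOURCE A (Python) =====
-- def has_seven(n):
--     if n % 7 == 0:
--         return True
--
--     while n > 0:
--         if n % 10 == 7:
--             return True
--
--         n //= 10
--
--     return False
-- ===== SOURCE B (Python) =====
-- def has_seven(n):
--     return n % 7 == 0 or (n > 0 and '7' in str(n))
-- ===== Notes on version B (the rewrite author's own statement) =====
-- stated objective: idiomatic
-- what changed: replaces the %10 // 10 digit-extraction while-loop with a single boolean expression using string membership '7' in str(n), guarded by n > 0 to match A's loop that only runs for positive n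
import Mathlib
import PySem

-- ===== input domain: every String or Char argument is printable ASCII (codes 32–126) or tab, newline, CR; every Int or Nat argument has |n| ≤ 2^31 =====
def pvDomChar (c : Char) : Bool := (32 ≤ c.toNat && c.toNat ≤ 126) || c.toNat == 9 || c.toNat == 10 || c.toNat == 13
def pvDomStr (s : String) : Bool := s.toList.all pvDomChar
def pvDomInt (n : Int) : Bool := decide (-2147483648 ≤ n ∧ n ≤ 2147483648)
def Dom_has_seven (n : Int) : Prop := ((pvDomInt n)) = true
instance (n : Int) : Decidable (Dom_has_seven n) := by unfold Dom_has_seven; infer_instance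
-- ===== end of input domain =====

-- B replaces A's %10 // 10 digit-extraction loop by the membership test '7' in str(n)
-- (guarded by n > 0, matching A's loop that only runs for positive n); objective: idiomatic, no speed claim.

-- ===== PORT A =====
-- termination measure for A's while loop (cited by decreasing_by below)
theorem hasSevenLoop_dec (n : Int) (h : 0 < n) :
    (PySem.Int.floordiv n 10).toNat < n.toNat := by
  rw [PySem.Int.floordiv_eq_ediv_of_pos (by omega)]
  omega

-- A's while loop: while n > 0: if n % 10 == 7: return True; n //= 10
def hasSevenLoop (n : Int) : Bool :=
  if h : 0 < n then
    if PySem.Int.mod n 10 = 7 then true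
    else hasSevenLoop (PySem.Int.floordiv n 10)
  else false
termination_by n.toNat
decreasing_by exact hasSevenLoop_dec n h

def has_seven (n : Int) : Bool :=
  if PySem.Int.mod n 7 = 0 then true
  else hasSevenLoop n

-- ===== PORT B =====
def has_seven_alt (n : Int) : Bool :=
  (PySem.Int.mod n 7 == 0) || (decide (0 < n) && PySem.Str.isIn "7" (PySem.Int.toStr n))

-- ===== PRECONDITION & SPEC =====
def Spec_has_seven (n : Int) (out : Bool) : Prop := out = has_seven_alt n
instance (n : Int) (out : Bool) : Decidable (Spec_has_seven n out) := by unfold Spec_has_seven; infer_instance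

-- ===== CLAIM (what is proved, stated in full; the proofs are below) =====
def Claim_equal_has_seven : Prop := ∀ (n : Int), Dom_has_seven n → Spec_has_seven n (has_seven n)

-- ===== LEMMAS AND PROOFS =====

theorem digitChar_eq_seven_iff (d : Nat) (hd : d < 10) : '7' = d.digitChar ↔ d = 7 := by
  interval_cases d <;> simp <;> decide

-- A's digit loop, on a positive Nat cast, tests exactly membership of '7' in the decimal digits.
theorem hasSevenLoop_eq_mem (m : Nat) (hm : 0 < m) :
    hasSevenLoop (m : Int) = decide ('7' ∈ Nat.toDigits 10 m) := by
  induction m using Nat.strong_induction_on with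
  | _ m ih =>
    rw [hasSevenLoop]
    rw [dif_pos (by exact_mod_cast hm)]
    rw [Nat.toDigits_eq_if (by norm_num)]
    have hmod : PySem.Int.mod (m : Int) 10 = ((m % 10 : Nat) : Int) := PySem.Int.mod_natCast m 10
    have hdiv : PySem.Int.floordiv (m : Int) 10 = ((m / 10 : Nat) : Int) := PySem.Int.floordiv_natCast m 10
    by_cases hlt : m < 10
    · rw [if_pos hlt]
      by_cases h7 : m % 10 = 7
      · have : m = 7 := by omega
        subst this
        rw [if_pos (by rw [hmod]; rfl)]
        decide
      · rw [if_neg (by rw [hmod]; exact_mod_cast h7)]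
        have : m / 10 = 0 := by omega
        rw [hdiv, this]
        rw [hasSevenLoop]
        have hne : m ≠ 7 := by omega
        simp [digitChar_eq_seven_iff m hlt, hne]
    · rw [if_neg hlt]
      by_cases h7 : m % 10 = 7
      · rw [if_pos (by rw [hmod, h7]; rfl)]
        have hmem : '7' ∈ Nat.toDigits 10 (m / 10) ++ [(m % 10).digitChar] := by
          rw [h7]; exact List.mem_append_right _ (by decide)
        simp [hmem]
      · rw [if_neg (by rw [hmod]; exact_mod_cast h7)]
        rw [hdiv, ih (m / 10) (by omega) (by omega)]
        simp [List.mem_append, digitChar_eq_seven_iff (m % 10) (by omega), h7]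

theorem isIn_seven_toStr (n : Int) (hn : 0 < n) :
    PySem.Str.isIn "7" (PySem.Int.toStr n) = decide ('7' ∈ Nat.toDigits 10 n.toNat) := by
  have h : PySem.Str.isIn "7" (PySem.Int.toStr n) = true ↔ '7' ∈ Nat.toDigits 10 n.toNat := by
    rw [PySem.Str.isIn_iff_infix, PySem.Int.toList_toStr]
    have : PySem.Int.toChars n = Nat.toDigits 10 n.toNat := by
      unfold PySem.Int.toChars
      rw [if_neg (by omega)]
    rw [this]
    show ['7'] <:+: _ ↔ _
    exact List.singleton_infix_iff '7' _
  rcases Bool.eq_false_or_eq_true (PySem.Str.isIn "7" (PySem.Int.toStr n)) with h0 | h0 <;>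
    simp_all

theorem has_seven_eq_alt (n : Int) : has_seven n = has_seven_alt n := by
  unfold has_seven has_seven_alt
  by_cases h7 : PySem.Int.mod n 7 = 0
  · rw [if_pos h7, h7]
    simp
  · rw [if_neg h7]
    have hb : (PySem.Int.mod n 7 == 0) = false := by rw [beq_eq_false_iff_ne]; exact h7
    rw [hb, Bool.false_or]
    by_cases hn : 0 < n
    · rw [isIn_seven_toStr n hn]
      have := hasSevenLoop_eq_mem n.toNat (by omega)
      rw [Int.toNat_of_nonneg (by omega)] at this
      simp [hn, this]
    · rw [hasSevenLoop, dif_neg hn]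
      simp [hn]

-- ===== VERDICT (by name: the statement is the Claim_ definition above) =====
theorem has_seven_spec : Claim_equal_has_seven := by
  intro n _
  exact has_seven_eq_alt n
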